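-- pv_equiv track=rewrite | github.com/lsh0107/solving_algorithms | 프로그래머스/2/84512. 모음 사전/모음 사전.py | solution
-- ===== SOURCE A (Python) =====
-- def solution(word):
--     from itertools import product
--     vowels = ['a','e','i','o','u']
--     vowels_list = []
--     for i in range(1, len(vowels)+1):
--         vowels_list += [''.join(permutation) for permutation in product(vowels, repeat=i)]
--
--     vowels_list.sort()
--     answer = vowels_list.index(word.lower()) + 1
--     return answer
-- ===== SOURCE B (Python) =====
-- def solution(word):
--     vowels = 'aeiou'
--     w = word.lower()
--     if not 0 < len(w) <= 5:
--         raise ValueError(f'{w!r} is not in list')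
--     idx = 0
--     for i, c in enumerate(w):
--         idx += vowels.index(c) * ((5 ** (5 - i) - 1) // 4) + 1
--     return idx
-- ===== Notes on version B (the rewrite author's own statement) =====
-- stated objective: faster
-- what changed: Replaces enumerating, sorting and linearly searching the whole 3905-word vowel dictionary by a direct positional formula: each character at position i contributes vowels.index(c)*((5**(5-i)-1)//4) + 1 to the 1-based index.
import Mathlib
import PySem

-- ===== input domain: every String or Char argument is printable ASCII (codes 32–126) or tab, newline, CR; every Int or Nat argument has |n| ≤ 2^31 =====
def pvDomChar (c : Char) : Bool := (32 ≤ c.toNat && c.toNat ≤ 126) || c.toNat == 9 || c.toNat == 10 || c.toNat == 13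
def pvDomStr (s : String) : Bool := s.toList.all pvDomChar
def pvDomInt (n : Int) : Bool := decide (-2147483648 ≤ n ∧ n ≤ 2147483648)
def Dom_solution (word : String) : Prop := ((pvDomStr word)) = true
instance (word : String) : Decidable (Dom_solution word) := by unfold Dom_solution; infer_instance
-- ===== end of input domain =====

-- B replaces A's build-sort-and-search of the whole 3905-word vowel dictionary by a direct
-- positional formula over the word's characters.

-- ===== PORT A =====
-- itertools.product(pool, repeat=i) ported by hand (no PySem primitive): the fold over the i
-- copies of the pool is exactly product's documented semantics (rightmost element varies
-- fastest); exact.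
def pyProduct (pools : List (List String)) : List (List String) :=
  pools.foldl (fun acc pool => acc.flatMap (fun t => pool.map (fun x => t ++ [x]))) [[]]

-- vowels_list after the 'for i in range(1, len(vowels)+1)' loop and the in-place .sort()
-- (list.sort() = sorted with the identity key).
def pvDict : List String :=
  PySem.List.sorted
    ((PySem.List.pyRange 1 (((["a","e","i","o","u"] : List String).length : Int) + 1) 1).foldl
      (fun acc i =>
        acc ++ (pyProduct (List.replicate i.toNat (["a","e","i","o","u"] : List String))).map
          (fun p => PySem.Str.join "" p)) [])
    (fun x => x)

def solution (word : String) : Int :=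
  match PySem.List.index? pvDict (PySem.Str.lower word) with
  | some i => (i : Int) + 1
  | none => 0   -- Python: list.index raises ValueError here; excluded by Pre_solution

-- ===== PORT B =====
def solution_alt (word : String) : Int :=
  let w := PySem.Str.lower word
  if 0 < PySem.Str.len w ∧ PySem.Str.len w ≤ 5 then
    (PySem.List.enumerate w.toList 0).foldl
      (fun idx p =>
        idx + (match PySem.List.index? "aeiou".toList p.2 with
               | some j => (j : Int)
               | none => 0)   -- Python: 'aeiou'.index raises ValueError here; excluded by Pre_solution
            * PySem.Int.floordiv ((5 : Int) ^ ((5 : Int) - p.1).toNat - 1) 4 + 1)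
      0
  else 0   -- Python: raises ValueError here; excluded by Pre_solution

-- ===== PRECONDITION & SPEC =====
-- Pre_ excludes exactly the inputs on which A raises ValueError (word.lower() not in the
-- dictionary): the empty word, more than 5 characters, or any character whose lowercase form
-- is not a vowel.
def Pre_solution (word : String) : Prop :=
  word.toList ≠ [] ∧ word.toList.length ≤ 5 ∧
    (word.toList.all
      (fun c => c ∈ (['a','e','i','o','u','A','E','I','O','U'] : List Char))) = true
instance (word : String) : Decidable (Pre_solution word) := by unfold Pre_solution; infer_instance

def pvWitness_solution : String := "aEiou"

def Spec_solution (word : String) (out : Int) : Prop := out = solution_alt word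
instance (word : String) (out : Int) : Decidable (Spec_solution word out) := by unfold Spec_solution; infer_instance

-- ===== CLAIM (what is proved, stated in full; the proofs are below) =====
def Claim_equal_solution : Prop := ∀ (word : String), Dom_solution word → Pre_solution word → Spec_solution word (solution word)

-- ===== LEMMAS AND PROOFS =====

def pvVowels : List Char := ['a','e','i','o','u']

-- one first-letter block of the sorted dictionary: v itself, then v prepended to every shorter word
def pvBlk (l : List (List Char)) (v : Char) : List (List Char) := [v] :: l.map (v :: ·)

-- the dictionary of all vowel words of length 1..n, in lexicographic order
def pvGen : Nat → List (List Char)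
  | 0 => []
  | n+1 => pvVowels.flatMap (pvBlk (pvGen n))

-- all vowel words of length exactly n, in lexicographic order
def pvE : Nat → List (List Char)
  | 0 => [[]]
  | n+1 => pvVowels.flatMap (fun v => (pvE n).map (v :: ·))

-- the same set grouped by length (= A's unsorted vowels_list)
def pvC : Nat → List (List Char)
  | 0 => []
  | n+1 => pvC n ++ pvE (n+1)

def pvD : Nat → List (List Char)
  | 0 => []
  | n+1 => pvD n ++ pvE (n+2)

-- 0-based index of a valid word in pvGen n
def pvG : Nat → List Char → Nat
  | _, [] => 0
  | 0, _ :: _ => 0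
  | n+1, c :: rest =>
      pvVowels.idxOf c * (1 + (pvGen n).length) + (if rest = [] then 0 else 1 + pvG n rest)

lemma pv_index?_append_of_not_mem {xs : List (List Char)} (ys : List (List Char))
    {v : List Char} (h : v ∉ xs) :
    PySem.List.index? (xs ++ ys) v = (PySem.List.index? ys v).map (· + xs.length) := by
  induction xs with
  | nil => simp
  | cons x xs ih =>
    simp only [List.mem_cons, not_or] at h
    rw [List.cons_append, PySem.List.index?_cons_of_ne _ (fun he => h.1 he.symm), ih h.2]
    cases PySem.List.index? ys v
    · simp
    · simp; omega

lemma pv_index?_map_inj {α β : Type} [BEq α] [LawfulBEq α] [BEq β] [LawfulBEq β]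
    {f : α → β} (hf : Function.Injective f) (xs : List α) (w : α) :
    PySem.List.index? (xs.map f) (f w) = PySem.List.index? xs w := by
  induction xs with
  | nil => simp
  | cons x xs ih =>
    by_cases hx : x = w
    · subst hx; rw [List.map_cons, PySem.List.index?_cons_self, PySem.List.index?_cons_self]
    · rw [List.map_cons, PySem.List.index?_cons_of_ne _ (fun he => hx (hf he)),
        PySem.List.index?_cons_of_ne _ hx, ih]

lemma pv_mem_blk {l : List (List Char)} {v : Char} {w : List Char} (h : w ∈ pvBlk l v) :
    ∃ t, w = v :: t := by
  simp only [pvBlk, List.mem_cons, List.mem_map] at h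
  rcases h with h | ⟨t, _, rfl⟩
  · exact ⟨[], h⟩
  · exact ⟨t, rfl⟩

lemma pvGen_mem_ne_nil : ∀ n, ∀ w ∈ pvGen n, w ≠ [] := by
  intro n
  cases n with
  | zero => intro w hw; simp [pvGen] at hw
  | succ n =>
    intro w hw
    simp only [pvGen, List.mem_flatMap] at hw
    obtain ⟨v, _, hb⟩ := hw
    obtain ⟨t, rfl⟩ := pv_mem_blk hb
    simp

-- the word lives in exactly one first-letter block; skip an earlier one
lemma pv_index_skip {l : List (List Char)} (ys : List (List Char)) {v c : Char}
    (hne : c ≠ v) (rest : List Char) :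
    PySem.List.index? (pvBlk l v ++ ys) (c :: rest)
      = (PySem.List.index? ys (c :: rest)).map (· + (1 + l.length)) := by
  have hlen : (pvBlk l v).length = 1 + l.length := by simp [pvBlk, Nat.add_comm]
  rw [pv_index?_append_of_not_mem ys, hlen]
  intro hmem
  obtain ⟨t, ht⟩ := pv_mem_blk hmem
  exact hne (by injection ht)

-- the word's position inside its own block
lemma pv_index_hit {n : Nat} (ys : List (List Char)) {v : Char} {rest : List Char}
    (hrest : rest ≠ [] → PySem.List.index? (pvGen n) rest = some (pvG n rest)) :
    PySem.List.index? (pvBlk (pvGen n) v ++ ys) (v :: rest)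
      = some (if rest = [] then 0 else 1 + pvG n rest) := by
  by_cases h : rest = []
  · subst h
    simp only [pvBlk, List.cons_append]
    exact PySem.List.index?_cons_self _ _
  · have hidx := hrest h
    have hinj : Function.Injective (v :: · : List Char → List Char) := by
      intro a b hab; injection hab
    have hmap : PySem.List.index? ((pvGen n).map (v :: ·)) (v :: rest) = some (pvG n rest) := by
      have := pv_index?_map_inj (f := (v :: ·)) hinj (pvGen n) rest
      rw [hidx] at this
      exact this
    have hmem : (v :: rest) ∈ (pvGen n).map (v :: ·) := by
      have := (PySem.List.index?_isSome_iff ((pvGen n).map (v :: ·)) (v :: rest)).mp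
        (by rw [hmap]; rfl)
      exact this
    have hne1 : ([v] : List Char) ≠ v :: rest := by
      intro he; injection he with _ h2; exact h (h2.symm)
    rw [pvBlk, List.cons_append, PySem.List.index?_cons_of_ne _ hne1,
      PySem.List.index?_append_of_mem _ hmem, hmap]
    simp [if_neg h]
    omega

lemma pv_index_hit_nil {n : Nat} {v : Char} {rest : List Char}
    (hrest : rest ≠ [] → PySem.List.index? (pvGen n) rest = some (pvG n rest)) :
    PySem.List.index? (pvBlk (pvGen n) v) (v :: rest)
      = some (if rest = [] then 0 else 1 + pvG n rest) := by
  rw [← List.append_nil (pvBlk (pvGen n) v)]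
  exact pv_index_hit [] hrest

lemma pvGen_index : ∀ (n : Nat) (w : List Char), w ≠ [] → w.length ≤ n →
    (∀ c ∈ w, c ∈ pvVowels) →
    PySem.List.index? (pvGen n) w = some (pvG n w) := by
  intro n
  induction n with
  | zero =>
    intro w hne hlen _
    cases w with
    | nil => exact absurd rfl hne
    | cons c rest => simp at hlen
  | succ n ih =>
    intro w hne hlen hval
    cases w with
    | nil => exact absurd rfl hne
    | cons c rest =>
      have hc : c ∈ pvVowels := hval c List.mem_cons_self
      have hrest : rest ≠ [] → PySem.List.index? (pvGen n) rest = some (pvG n rest) := by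
        intro hr
        refine ih rest hr ?_ ?_
        · simp only [List.length_cons] at hlen; omega
        · intro x hx; exact hval x (List.mem_cons_of_mem _ hx)
      have hL : (pvGen (n+1)) = pvBlk (pvGen n) 'a' ++ (pvBlk (pvGen n) 'e' ++
          (pvBlk (pvGen n) 'i' ++ (pvBlk (pvGen n) 'o' ++ pvBlk (pvGen n) 'u'))) := by
        simp [pvGen, pvVowels, List.flatMap_cons, List.flatMap_nil]
      fin_cases hc
      · rw [hL, pv_index_hit _ hrest]
        simp only [pvG, pvVowels, Option.some.injEq]
        have : (['a','e','i','o','u'] : List Char).idxOf 'a' = 0 := by decide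
        rw [this]; split <;> omega
      · rw [hL, pv_index_skip _ (by decide) rest, pv_index_hit _ hrest]
        simp only [pvG, pvVowels, Option.map_some, Option.some.injEq]
        have : (['a','e','i','o','u'] : List Char).idxOf 'e' = 1 := by decide
        rw [this]; split <;> omega
      · rw [hL, pv_index_skip _ (by decide) rest, pv_index_skip _ (by decide) rest,
          pv_index_hit _ hrest]
        simp only [pvG, pvVowels, Option.map_some, Option.some.injEq]
        have : (['a','e','i','o','u'] : List Char).idxOf 'i' = 2 := by decide
        rw [this]; split <;> omega
      · rw [hL, pv_index_skip _ (by decide) rest, pv_index_skip _ (by decide) rest,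
          pv_index_skip _ (by decide) rest, pv_index_hit _ hrest]
        simp only [pvG, pvVowels, Option.map_some, Option.some.injEq]
        have : (['a','e','i','o','u'] : List Char).idxOf 'o' = 3 := by decide
        rw [this]; split <;> omega
      · rw [hL, pv_index_skip _ (by decide) rest, pv_index_skip _ (by decide) rest,
          pv_index_skip _ (by decide) rest, pv_index_skip _ (by decide) rest,
          pv_index_hit_nil hrest]
        simp only [pvG, pvVowels, Option.map_some, Option.some.injEq]
        have : (['a','e','i','o','u'] : List Char).idxOf 'u' = 4 := by decide
        rw [this]; split <;> omega

-- ===== perm: pvGen n is a rearrangement of A's by-length list =====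

lemma pv_perm_flatMap_cons {α β : Type} (l : List α) (f : α → β) (g : α → List β) :
    (l.flatMap fun v => f v :: g v).Perm (l.map f ++ l.flatMap g) := by
  induction l with
  | nil => simp
  | cons v l ih =>
    simp only [List.flatMap_cons, List.map_cons, List.cons_append]
    refine List.Perm.cons _ ?_
    have h1 : (g v ++ l.flatMap fun v => f v :: g v).Perm ((g v ++ l.map f) ++ l.flatMap g) := by
      rw [List.append_assoc]; exact List.Perm.append_left _ ih
    have h2 : ((g v ++ l.map f) ++ l.flatMap g).Perm (l.map f ++ (g v ++ l.flatMap g)) := by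
      have := List.Perm.append_right (l.flatMap g)
        (List.perm_append_comm (l₁ := g v) (l₂ := l.map f))
      simpa [List.append_assoc] using this
    exact h1.trans h2

lemma pvD_aux : ∀ m, (pvVowels.flatMap fun v => (pvC m).map (v :: ·)).Perm (pvD m) := by
  intro m
  induction m with
  | zero => simp [pvC, pvD]
  | succ m ih =>
    have h1 : (pvVowels.flatMap fun v => (pvC (m+1)).map (v :: ·))
        = pvVowels.flatMap fun v => (pvC m).map (v :: ·) ++ (pvE (m+1)).map (v :: ·) := by
      simp [pvC, List.map_append]
    rw [h1]
    have h2 := (List.flatMap_append_perm pvVowels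
      (fun v => (pvC m).map (v :: ·)) (fun v => (pvE (m+1)).map (v :: ·))).symm
    have h3 : (pvVowels.flatMap fun v => (pvE (m+1)).map (v :: ·)) = pvE (m+2) := rfl
    rw [h3] at h2
    exact h2.trans (List.Perm.append_right _ ih)

lemma pvED : ∀ m, (pvE 1 ++ pvD m).Perm (pvC (m+1)) := by
  intro m
  induction m with
  | zero => simp [pvC, pvD]
  | succ m ih =>
    have : pvE 1 ++ pvD (m+1) = (pvE 1 ++ pvD m) ++ pvE (m+2) := by
      simp [pvD, List.append_assoc]
    rw [this]
    exact List.Perm.append_right _ ih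

lemma pvGen_perm : ∀ n, (pvGen n).Perm (pvC n) := by
  intro n
  induction n with
  | zero => simp [pvGen, pvC]
  | succ n ih =>
    have h0 : pvGen (n+1) = pvVowels.flatMap fun v => [v] :: (pvGen n).map (v :: ·) := rfl
    have h1 := pv_perm_flatMap_cons pvVowels (fun v => [v]) (fun v => (pvGen n).map (v :: ·))
    have h2 : pvVowels.map (fun v => [v]) = pvE 1 := by decide
    have h3 : (pvVowels.flatMap fun v => (pvGen n).map (v :: ·)).Perm
        (pvVowels.flatMap fun v => (pvC n).map (v :: ·)) :=
      List.Perm.flatMap_left _ (fun a _ => List.Perm.map _ ih)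
    rw [h0]
    refine (h1.trans ?_).trans (pvED n)
    rw [h2]
    exact List.Perm.append_left _ (h3.trans (pvD_aux n))

-- ===== pairwise: pvGen n is strictly increasing =====

lemma pv_nil_lt {t : List Char} (h : t ≠ []) : ([] : List Char) < t := by
  cases t with
  | nil => simp at h
  | cons a t => exact List.nil_lt_cons _ _

lemma pv_blk_pairwise {l : List (List Char)} (hp : l.Pairwise (· < ·))
    (hne : ∀ w ∈ l, w ≠ []) (v : Char) : (pvBlk l v).Pairwise (· < ·) := by
  unfold pvBlk
  refine List.Pairwise.cons ?_
    (List.Pairwise.map _ (fun a b h => List.cons_lt_cons_iff.mpr (Or.inr ⟨rfl, h⟩)) hp)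
  intro y hy
  obtain ⟨t, ht, rfl⟩ := List.mem_map.mp hy
  exact List.cons_lt_cons_iff.mpr (Or.inr ⟨rfl, pv_nil_lt (hne t ht)⟩)

lemma pv_flatMap_blk_pairwise {l : List (List Char)} (hp : l.Pairwise (· < ·))
    (hne : ∀ w ∈ l, w ≠ []) :
    ∀ (vs : List Char), vs.Pairwise (· < ·) →
      (vs.flatMap (pvBlk l)).Pairwise (· < ·) := by
  intro vs hvs
  induction vs with
  | nil => simp
  | cons v vs ih =>
    rw [List.flatMap_cons, List.pairwise_append]
    refine ⟨pv_blk_pairwise hp hne v, ih (List.Pairwise.of_cons hvs), ?_⟩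
    intro x hx y hy
    obtain ⟨tx, rfl⟩ := pv_mem_blk hx
    obtain ⟨v', hv', hy'⟩ := List.mem_flatMap.mp hy
    obtain ⟨ty, rfl⟩ := pv_mem_blk hy'
    exact List.cons_lt_cons_iff.mpr (Or.inl ((List.pairwise_cons.mp hvs).1 v' hv'))

lemma pvGen_pairwise : ∀ n, (pvGen n).Pairwise (· < ·) := by
  intro n
  induction n with
  | zero => simp [pvGen]
  | succ n ih =>
    exact pv_flatMap_blk_pairwise ih (pvGen_mem_ne_nil n) pvVowels (by decide)

-- ===== A's unsorted vowels_list is (pvC 5).map String.ofList =====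

lemma pv_joinSing : ∀ (u : List Char),
    PySem.Str.join "" (u.map fun c => String.ofList [c]) = String.ofList u := by
  intro u
  have h : (PySem.Str.join "" (u.map fun c => String.ofList [c])).toList = u := by
    simp only [PySem.Str.toList_join, List.map_map]
    have h1 : (String.toList ∘ fun c => String.ofList [c]) = fun c => [c] := by
      funext c; simp [String.toList_ofList]
    rw [h1]
    simpa using PySem.Chars.join_nil_singletons u
  calc PySem.Str.join "" (u.map fun c => String.ofList [c])
      = String.ofList (PySem.Str.join "" (u.map fun c => String.ofList [c])).toList :=
        (String.ofList_toList).symm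
    _ = String.ofList u := by rw [h]

-- E's recursion also holds for extension on the right
lemma pvE_concat : ∀ k, (pvE k).flatMap (fun t => pvVowels.map (t ++ [·])) = pvE (k+1) := by
  intro k
  induction k with
  | zero => decide
  | succ k ih =>
    have h0 : pvE (k+1) = pvVowels.flatMap fun v => (pvE k).map (v :: ·) := rfl
    conv_lhs => rw [h0]
    rw [List.flatMap_assoc]
    have h1 : ∀ v ∈ pvVowels, ((pvE k).map (v :: ·)).flatMap (fun t => pvVowels.map (t ++ [·]))
        = ((pvE k).flatMap fun t => pvVowels.map (t ++ [·])).map (v :: ·) := by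
      intro v _
      rw [List.flatMap_map, List.map_flatMap]
      rfl
    calc (pvVowels.flatMap fun v => ((pvE k).map (v :: ·)).flatMap fun t => pvVowels.map (t ++ [·]))
        = pvVowels.flatMap fun v => ((pvE k).flatMap fun t => pvVowels.map (t ++ [·])).map (v :: ·) :=
          List.flatMap_congr (fun v hv => h1 v hv)
      _ = pvVowels.flatMap fun v => (pvE (k+1)).map (v :: ·) := by rw [ih]
      _ = pvE (k+2) := rfl

set_option maxRecDepth 100000 in
lemma pv_prod4 : pyProduct (List.replicate 4 (["a","e","i","o","u"] : List String))
    = (pvE 4).map (fun t => t.map fun c => String.ofList [c]) := by decide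

-- length-5 block, assembled from the length-4 block to keep kernel evaluation shallow
lemma pv_block5 : (pyProduct (List.replicate 5 (["a","e","i","o","u"] : List String))).map
    (fun p => PySem.Str.join "" p) = (pvE 5).map String.ofList := by
  have h0 : pyProduct (List.replicate 5 (["a","e","i","o","u"] : List String))
      = (pyProduct (List.replicate 4 (["a","e","i","o","u"] : List String))).flatMap
          (fun t => (["a","e","i","o","u"] : List String).map (fun x => t ++ [x])) := by
    rw [show (List.replicate 5 (["a","e","i","o","u"] : List String))
        = List.replicate 4 (["a","e","i","o","u"] : List String) ++ [["a","e","i","o","u"]] from rfl]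
    unfold pyProduct
    rw [List.foldl_append]
    rfl
  rw [h0, pv_prod4, List.flatMap_map, List.map_flatMap]
  rw [← pvE_concat 4, List.map_flatMap]
  refine List.flatMap_congr (fun t _ => ?_)
  have hv : (["a","e","i","o","u"] : List String) = pvVowels.map fun c => String.ofList [c] := by
    decide
  rw [hv, List.map_map, List.map_map, List.map_map]
  refine List.map_congr_left (fun v _ => ?_)
  show PySem.Str.join "" (t.map (fun c => String.ofList [c]) ++ [String.ofList [v]]) = _
  rw [show (t.map (fun c => String.ofList [c]) ++ [String.ofList [v]])
      = (t ++ [v]).map fun c => String.ofList [c] by simp]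
  exact pv_joinSing (t ++ [v])

set_option maxRecDepth 100000 in
lemma pv_block1 : (pyProduct (List.replicate 1 (["a","e","i","o","u"] : List String))).map
    (fun p => PySem.Str.join "" p) = (pvE 1).map String.ofList := by decide

set_option maxRecDepth 100000 in
lemma pv_block2 : (pyProduct (List.replicate 2 (["a","e","i","o","u"] : List String))).map
    (fun p => PySem.Str.join "" p) = (pvE 2).map String.ofList := by decide

set_option maxRecDepth 100000 in
lemma pv_block3 : (pyProduct (List.replicate 3 (["a","e","i","o","u"] : List String))).map
    (fun p => PySem.Str.join "" p) = (pvE 3).map String.ofList := by decide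

set_option maxRecDepth 100000 in
lemma pv_block4 : (pyProduct (List.replicate 4 (["a","e","i","o","u"] : List String))).map
    (fun p => PySem.Str.join "" p) = (pvE 4).map String.ofList := by decide

lemma pv_unsorted_eq : ((PySem.List.pyRange 1 (((["a","e","i","o","u"] : List String).length : Int) + 1) 1).foldl
      (fun acc i =>
        acc ++ (pyProduct (List.replicate i.toNat (["a","e","i","o","u"] : List String))).map
          (fun p => PySem.Str.join "" p)) [])
    = (pvC 5).map String.ofList := by
  have hr : PySem.List.pyRange 1 (((["a","e","i","o","u"] : List String).length : Int) + 1) 1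
      = [1, 2, 3, 4, 5] := by decide
  rw [hr]
  simp only [List.foldl_cons, List.foldl_nil, List.nil_append]
  rw [show ((1:Int)).toNat = 1 from rfl, show ((2:Int)).toNat = 2 from rfl,
    show ((3:Int)).toNat = 3 from rfl, show ((4:Int)).toNat = 4 from rfl,
    show ((5:Int)).toNat = 5 from rfl]
  rw [pv_block1, pv_block2, pv_block3, pv_block4, pv_block5]
  simp [pvC, List.map_append, List.append_assoc]

-- ===== the sorted dictionary is pvGen 5 =====

lemma pv_ofList_inj : Function.Injective String.ofList := by
  intro a b h
  have := congrArg String.toList h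
  simpa using this

lemma pvDict_eq : pvDict = (pvGen 5).map String.ofList := by
  unfold pvDict
  rw [pv_unsorted_eq]
  refine PySem.List.sorted_eq_of_perm_of_pairwise_lt _ _ _ ?_ ?_
  · exact List.Perm.map _ (pvGen_perm 5)
  · refine List.Pairwise.map _ (fun a b h => ?_) (pvGen_pairwise 5)
    exact String.lt_iff_toList_lt.mpr (by simpa [String.toList_ofList] using h)

-- ===== B's fold computes the same index =====

set_option maxRecDepth 100000 in
lemma pv_weight : ∀ n : Nat, 1 ≤ n → n ≤ 5 →
    PySem.Int.floordiv ((5 : Int) ^ n - 1) 4 = 1 + ((pvGen (n - 1)).length : Int) := by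
  intro n h1 h5
  interval_cases n
  · decide
  · decide
  · decide
  · decide
  · decide

lemma pvB_fold : ∀ (w : List Char) (n : Nat) (acc : Int), w ≠ [] → w.length ≤ n → n ≤ 5 →
    (∀ c ∈ w, c ∈ pvVowels) →
    (PySem.List.enumerate w ((5 : Int) - n)).foldl
      (fun idx p =>
        idx + (match PySem.List.index? "aeiou".toList p.2 with
               | some j => (j : Int)
               | none => 0)
            * PySem.Int.floordiv ((5 : Int) ^ ((5 : Int) - p.1).toNat - 1) 4 + 1)
      acc
    = acc + pvG n w + 1 := by
  intro w
  induction w with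
  | nil => intro n acc hne _ _ _; exact absurd rfl hne
  | cons c rest ih =>
    intro n acc _ hlen h5 hval
    cases n with
    | zero => simp at hlen
    | succ m =>
      have hc : c ∈ pvVowels := hval c List.mem_cons_self
      have hidx : PySem.List.index? "aeiou".toList c = some (pvVowels.idxOf c) := by
        fin_cases hc <;> decide
      have htn : ((5 : Int) - ((5 : Int) - (m+1 : Nat))).toNat = m + 1 := by omega
      have hw : PySem.Int.floordiv ((5 : Int) ^ ((5 : Int) - ((5 : Int) - ((m+1 : Nat) : Int))).toNat - 1) 4
          = 1 + ((pvGen m).length : Int) := by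
        rw [htn]
        simpa using pv_weight (m+1) (by omega) (by omega)
      rw [PySem.List.enumerate_cons, List.foldl_cons]
      by_cases hr : rest = []
      · subst hr
        simp only [PySem.List.enumerate_nil, List.foldl_nil, hidx, hw, pvG]
        push_cast
        ring
      · have hstep : (5 : Int) - ((m+1 : Nat) : Int) + 1 = (5 : Int) - (m : Nat) := by
          push_cast; ring
        have hlen' : rest.length ≤ m := by simp only [List.length_cons] at hlen; omega
        rw [hstep, ih m _ hr hlen' (by omega) (fun x hx => hval x (List.mem_cons_of_mem _ hx))]
        simp only [hidx, hw, pvG, if_neg hr]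
        push_cast
        ring

-- ===== assembling the verdict =====

lemma pv_lower_mem {c : Char} (h : c ∈ (['a','e','i','o','u','A','E','I','O','U'] : List Char)) :
    PySem.Chars.lowerChar c ∈ pvVowels := by
  fin_cases h <;> decide

lemma pv_lower_toList (word : String) :
    (PySem.Str.lower word).toList = word.toList.map PySem.Chars.lowerChar := by
  simp [PySem.Chars.lower]

-- ===== VERDICT (by name: the statement is the Claim_ definition above) =====
theorem solution_spec : Claim_equal_solution := by
  intro word _ hpre
  obtain ⟨h1, h2, h3⟩ := hpre
  unfold Spec_solution
  set w : List Char := (PySem.Str.lower word).toList with hw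
  have hwmap : w = word.toList.map PySem.Chars.lowerChar := pv_lower_toList word
  have hne : w ≠ [] := by
    rw [hwmap]; simpa using h1
  have hlen : w.length ≤ 5 := by
    rw [hwmap]; simpa using h2
  have h3' : ∀ c ∈ word.toList, c ∈ (['a','e','i','o','u','A','E','I','O','U'] : List Char) := by
    simpa using h3
  have hval : ∀ c ∈ w, c ∈ pvVowels := by
    intro c hc
    rw [hwmap] at hc
    obtain ⟨x, hx, rfl⟩ := List.mem_map.mp hc
    exact pv_lower_mem (h3' x hx)
  have hlow : PySem.Str.lower word = String.ofList w := (String.ofList_toList).symm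
  have hidx : PySem.List.index? pvDict (PySem.Str.lower word) = some (pvG 5 w) := by
    rw [pvDict_eq, hlow, pv_index?_map_inj pv_ofList_inj, pvGen_index 5 w hne hlen hval]
  have hA : solution word = (pvG 5 w : Int) + 1 := by
    unfold solution
    rw [hidx]
  have hcond : 0 < PySem.Str.len (PySem.Str.lower word) ∧
      PySem.Str.len (PySem.Str.lower word) ≤ 5 := by
    rw [PySem.Str.len_eq, ← hw]
    constructor
    · have : 0 < w.length := List.length_pos_of_ne_nil hne
      exact_mod_cast this
    · exact_mod_cast hlen
  have hB : solution_alt word = (0 : Int) + pvG 5 w + 1 := by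
    unfold solution_alt
    rw [if_pos hcond, ← hw]
    have := pvB_fold w 5 0 hne hlen (by omega) hval
    rw [show (5 : Int) - ((5 : Nat) : Int) = 0 by norm_num] at this
    exact this
  rw [hA, hB]
  ring
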